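-- pv_equiv track=rewrite | github.com/ruben-sa-brito/codewars | python/7 kyu/help_warrior.py | get_honor_path
-- ===== SOURCE A (Python) =====
-- def get_honor_path(honor_score, target_honor_score):
--     katas = {'2kyus':0, '1kyus':0}
--
--     target = target_honor_score - honor_score
--
--     if target <= 0: return {}
--
--     while True:
--         if katas['2kyus'] + katas['1kyus']*2 == target: return katas
--
--         if katas['1kyus']*2 + 2 <= target:
--             katas['1kyus'] += 1
--         else:
--             katas['2kyus'] += 1
-- ===== SOURCE B (Python) =====
-- def get_honor_path(honor_score, target_honor_score):
--     target = target_honor_score - honor_score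
--     if target <= 0:
--         return {}
--     return {'2kyus': target % 2, '1kyus': target // 2}
-- ===== Notes on version B (the rewrite author's own statement) =====
-- stated objective: faster
-- what changed: Replaced the O(target) counting loop with the closed form {'2kyus': target % 2, '1kyus': target // 2}.
import Mathlib
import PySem

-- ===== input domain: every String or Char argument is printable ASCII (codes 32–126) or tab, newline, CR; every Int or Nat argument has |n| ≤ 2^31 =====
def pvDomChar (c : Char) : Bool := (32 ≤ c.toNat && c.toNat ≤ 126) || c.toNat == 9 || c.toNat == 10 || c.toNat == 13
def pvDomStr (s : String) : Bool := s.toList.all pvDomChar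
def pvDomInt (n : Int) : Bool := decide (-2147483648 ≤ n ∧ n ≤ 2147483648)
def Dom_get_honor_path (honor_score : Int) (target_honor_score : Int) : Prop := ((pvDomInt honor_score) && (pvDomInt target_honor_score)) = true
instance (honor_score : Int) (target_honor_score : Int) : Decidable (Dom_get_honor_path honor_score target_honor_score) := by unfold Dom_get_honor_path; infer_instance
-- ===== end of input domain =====

-- B replaces A's O(target) increment loop by the closed form target%2 / target//2 (O(1)); return value only.

-- ===== PORT A =====
-- A's 'while True' loop over the katas dict, one step per iteration; the fuel only
-- makes the recursion total and is proven sufficient (the loop ends within target steps).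
def pvLoopA (target : Int) (fuel : Nat) (two one : Int) : List (String × Int) :=
  match fuel with
  | 0 => []
  | fuel + 1 =>
    if two + one * 2 == target then [("2kyus", two), ("1kyus", one)]
    else if one * 2 + 2 ≤ target then pvLoopA target fuel two (one + 1)
    else pvLoopA target fuel (two + 1) one

def get_honor_path (honor_score : Int) (target_honor_score : Int) : List (String × Int) :=
  let target := target_honor_score - honor_score
  if target ≤ 0 then []
  else pvLoopA target (target.toNat + 1) 0 0

-- ===== PORT B =====
def get_honor_path_alt (honor_score : Int) (target_honor_score : Int) : List (String × Int) :=
  let target := target_honor_score - honor_score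
  if target ≤ 0 then []
  else [("2kyus", PySem.Int.mod target 2), ("1kyus", PySem.Int.floordiv target 2)]

-- ===== PRECONDITION & SPEC =====
def Spec_get_honor_path (honor_score : Int) (target_honor_score : Int) (out : List (String × Int)) : Prop := out = get_honor_path_alt honor_score target_honor_score
instance (honor_score : Int) (target_honor_score : Int) (out : List (String × Int)) : Decidable (Spec_get_honor_path honor_score target_honor_score out) := by unfold Spec_get_honor_path; infer_instance

-- ===== CLAIM (what is proved, stated in full; the proofs are below) =====
def Claim_equal_get_honor_path : Prop := ∀ (honor_score : Int) (target_honor_score : Int), Dom_get_honor_path honor_score target_honor_score → Spec_get_honor_path honor_score target_honor_score (get_honor_path honor_score target_honor_score)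

-- ===== LEMMAS AND PROOFS =====

-- A's loop never increments 2kyus until the very end, so its reachable states are (0, one);
-- from any such state within fuel it returns the closed form.
theorem pvLoopA_closed (target : Int) (fuel : Nat) (one : Int)
    (h1 : 2 * one ≤ target) (hf : (target - 2 * one).toNat < fuel) :
    pvLoopA target fuel 0 one = [("2kyus", target % 2), ("1kyus", target / 2)] := by
  induction fuel generalizing one with
  | zero => omega
  | succ fuel ih =>
    by_cases heq : (0 : Int) + one * 2 = target
    · simp only [pvLoopA, heq]
      have h2 : target % 2 = 0 := by omega
      have h3 : target / 2 = one := by omega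
      simp [h2, h3]
    · by_cases hle : one * 2 + 2 ≤ target
      · have := ih (one + 1) (by omega) (by omega)
        simp only [pvLoopA]
        rw [if_neg (by simpa using heq), if_pos hle]
        exact this
      · -- target = 2*one + 1: one more step sets two := 1, then it matches
        have ht : target = 2 * one + 1 := by omega
        simp only [pvLoopA]
        rw [if_neg (by simpa using heq), if_neg hle]
        cases fuel with
        | zero => exfalso; omega
        | succ f =>
          simp only [pvLoopA]
          rw [if_pos (by rw [beq_iff_eq]; omega)]
          have h2 : target % 2 = 1 := by omega
          have h3 : target / 2 = one := by omega
          simp [h2, h3]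

-- ===== VERDICT (by name: the statement is the Claim_ definition above) =====
theorem get_honor_path_spec : Claim_equal_get_honor_path := by
  intro h t _
  unfold Spec_get_honor_path get_honor_path get_honor_path_alt
  set target := t - h with htarget
  by_cases hpos : target ≤ 0
  · simp [hpos]
  · rw [if_neg hpos, if_neg hpos]
    rw [pvLoopA_closed target (target.toNat + 1) 0 (by omega) (by omega)]
    rw [PySem.Int.mod_eq_emod_of_pos (by omega), PySem.Int.floordiv_eq_ediv_of_pos (by omega)]
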